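-- pv_equiv track=rewrite | github.com/acarrasco/advent_of_code | 2024/day21/part1.py | robot_movements
-- ===== SOURCE A (Python) =====
-- RANK = '<v>^'
--
-- DIRECTIONS_KEYS = {
--     (-1, 0): '^',
--     (1, 0): 'v',
--     (0, 1): '>',
--     (0, -1): '<',
-- }
--
-- def calculate_movement_cursors(keyboard_positions, start, end):
--     i, j = start
--     ei, ej = end
--     gi, gj = keyboard_positions[' ']
--
--     di, dj = ei - i, ej - j
--
--     if i == gi and ej == gj:
--         for k in range(abs(di)):
--             yield DIRECTIONS_KEYS[di // abs(di), 0]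
--         for k in range(abs(dj)):
--             yield DIRECTIONS_KEYS[0, dj // abs(dj)]
--     elif j == gj and ei == gi:
--         for k in range(abs(dj)):
--             yield DIRECTIONS_KEYS[0, dj // abs(dj)]
--         for k in range(abs(di)):
--             yield DIRECTIONS_KEYS[di // abs(di), 0]
--     else:
--         movements = [
--                 DIRECTIONS_KEYS[di // abs(di), 0] for _ in range(abs(di))
--             ] + [
--                 DIRECTIONS_KEYS[0, dj // abs(dj)] for _ in range(abs(dj))
--         ]
--         yield from sorted(movements, key=RANK.index)
--
-- def robot_movements(keyboard_positions, start_key, key_sequence):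
--     position = keyboard_positions[start_key]
--     key = start_key
--
--     for next_key in key_sequence:
--         next_position = keyboard_positions[next_key]
--         yield from calculate_movement_cursors(keyboard_positions, position, next_position)
--         yield 'A'
--         position = next_position
--         key = next_key
-- ===== SOURCE B (Python) =====
-- def _transition(gap, a, b):
--     (i, j), (ei, ej), (gi, gj) = a, b, gap
--     di, dj = ei - i, ej - j
--     h = '<' * -dj if dj < 0 else '>' * dj
--     v = '^' * -di if di < 0 else 'v' * di
--     if i == gi and ej == gj:
--         h_first = False
--     elif j == gj and ei == gi:
--         h_first = True
--     else:
--         h_first = dj < 0 or di < 0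
--     return (h + v if h_first else v + h) + 'A'
--
-- def robot_movements(keyboard_positions, start_key, key_sequence):
--     path = [keyboard_positions[start_key]] + [keyboard_positions[k] for k in key_sequence]
--     for a, b in zip(path, path[1:]):
--         yield from _transition(keyboard_positions[' '], a, b)
-- ===== Notes on version B (the rewrite author's own statement) =====
-- stated objective: simpler
-- what changed: B precomputes the whole position path, then flat-maps a pure per-transition helper over adjacent pairs, choosing segment order by a closed-form sign test (dj<0 or di<0) instead of A's stateful loop with per-step direction-dict lookups and a RANK-keyed stable sort of the movement list.
import Mathlib
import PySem

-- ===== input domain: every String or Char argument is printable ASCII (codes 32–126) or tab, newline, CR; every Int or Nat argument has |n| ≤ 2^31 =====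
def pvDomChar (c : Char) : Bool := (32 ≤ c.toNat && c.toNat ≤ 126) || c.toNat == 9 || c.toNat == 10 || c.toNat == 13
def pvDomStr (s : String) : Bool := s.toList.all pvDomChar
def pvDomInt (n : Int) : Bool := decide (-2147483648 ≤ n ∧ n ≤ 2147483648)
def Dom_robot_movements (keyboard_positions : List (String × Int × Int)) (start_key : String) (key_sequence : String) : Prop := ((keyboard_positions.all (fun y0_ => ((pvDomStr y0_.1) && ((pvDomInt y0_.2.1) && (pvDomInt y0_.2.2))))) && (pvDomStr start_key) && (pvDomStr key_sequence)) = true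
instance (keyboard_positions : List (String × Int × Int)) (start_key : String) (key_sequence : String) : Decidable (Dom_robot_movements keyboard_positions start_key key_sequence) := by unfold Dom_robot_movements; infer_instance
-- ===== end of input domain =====

-- B precomputes the position path, flat-maps a pure per-transition helper over adjacent pairs and
-- picks segment order by a closed-form sign test (dj<0 or di<0), instead of A's stateful generator
-- loop with per-step direction-dict lookups and a RANK-keyed stable sort; objective: simpler.
-- NOTE: both Pythons are generators; the equivalence is about the yielded sequence (as a list).


-- ===== PORT A =====
def pvRANK : String := "<v>^"

def pvDIRECTIONS_KEYS : PySem.Dict (Int × Int) String :=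
  PySem.Dict.mk [(((-1 : Int), (0 : Int)), "^"), (((1 : Int), (0 : Int)), "v"),
                 (((0 : Int), (1 : Int)), ">"), (((0 : Int), (-1 : Int)), "<")]

-- DIRECTIONS_KEYS[p]; every lookup A performs hits (keys (±1,0)/(0,±1)), so the default is never used
def pvDirKey (p : Int × Int) : String := (pvDIRECTIONS_KEYS.get? p).getD ""

def calculate_movement_cursors (keyboard_positions : List (String × Int × Int))
    (start fin : Int × Int) : List String :=
  match (PySem.Dict.mk keyboard_positions).get? " " with
  | none => []  -- Python: KeyError on keyboard_positions[' ']; excluded by Pre_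
  | some g =>
    let i := start.1; let j := start.2
    let ei := fin.1; let ej := fin.2
    let gi := g.1; let gj := g.2
    let di := ei - i
    let dj := ej - j
    if i = gi ∧ ej = gj then
      (PySem.List.pyRange 0 |di| 1).map (fun _ => pvDirKey (PySem.Int.floordiv di |di|, 0)) ++
      (PySem.List.pyRange 0 |dj| 1).map (fun _ => pvDirKey (0, PySem.Int.floordiv dj |dj|))
    else if j = gj ∧ ei = gi then
      (PySem.List.pyRange 0 |dj| 1).map (fun _ => pvDirKey (0, PySem.Int.floordiv dj |dj|)) ++
      (PySem.List.pyRange 0 |di| 1).map (fun _ => pvDirKey (PySem.Int.floordiv di |di|, 0))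
    else
      -- key=RANK.index: every movement char occurs in RANK, where str.index = PySem.Str.find
      PySem.List.sorted
        ((PySem.List.pyRange 0 |di| 1).map (fun _ => pvDirKey (PySem.Int.floordiv di |di|, 0)) ++
         (PySem.List.pyRange 0 |dj| 1).map (fun _ => pvDirKey (0, PySem.Int.floordiv dj |dj|)))
        (fun m => PySem.Str.find pvRANK m)

def robot_movements (keyboard_positions : List (String × Int × Int)) (start_key : String) (key_sequence : String) : List String :=
  match (PySem.Dict.mk keyboard_positions).get? start_key with
  | none => []  -- Python: KeyError on keyboard_positions[start_key]; excluded by Pre_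
  | some position =>
    (key_sequence.toList.foldl
      (fun (st : List String × (Int × Int)) next_key =>
        match (PySem.Dict.mk keyboard_positions).get? (String.ofList [next_key]) with
        | none => st  -- Python: KeyError; excluded by Pre_
        | some next_position =>
          (st.1 ++ calculate_movement_cursors keyboard_positions st.2 next_position ++ ["A"], next_position))
      ([], position)).1

-- ===== PORT B =====
-- one transition: the two run segments plus 'A', order chosen by the gap rules then the sign test
def pvTrans (kp : List (String × Int × Int)) (a b : Int × Int) : List String :=
  match (PySem.Dict.mk kp).get? " " with
  | none => []  -- Python: KeyError; excluded by Pre_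
  | some g =>
    let di := b.1 - a.1
    let dj := b.2 - a.2
    let h : List String := if dj < 0 then List.replicate (-dj).toNat "<" else List.replicate dj.toNat ">"
    let v : List String := if di < 0 then List.replicate (-di).toNat "^" else List.replicate di.toNat "v"
    let hFirst : Bool :=
      if a.1 = g.1 ∧ b.2 = g.2 then false
      else if a.2 = g.2 ∧ b.1 = g.1 then true
      else decide (dj < 0 ∨ di < 0)
    (if hFirst then h ++ v else v ++ h) ++ ["A"]

def robot_movements_alt (keyboard_positions : List (String × Int × Int)) (start_key : String) (key_sequence : String) : List String :=
  match (PySem.Dict.mk keyboard_positions).get? start_key with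
  | none => []  -- Python: KeyError; excluded by Pre_
  | some p0 =>
    let path : List (Int × Int) :=
      p0 :: key_sequence.toList.map
        (fun c => (((PySem.Dict.mk keyboard_positions).get? (String.ofList [c])).getD (0, 0)))
        -- Python: KeyError on a missing key; excluded by Pre_, the default is never used there
    (path.zip path.tail).flatMap (fun p => pvTrans keyboard_positions p.1 p.2)

-- ===== PRECONDITION & SPEC =====
-- Pre_ excludes exactly the inputs where Python A raises KeyError: missing start_key, a key of the
-- sequence missing, or (when the sequence is nonempty) a missing ' ' gap key.
def Pre_robot_movements (keyboard_positions : List (String × Int × Int)) (start_key : String) (key_sequence : String) : Prop :=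
  ((PySem.Dict.mk keyboard_positions).get? start_key).isSome = true ∧
  (key_sequence.toList.all (fun c => ((PySem.Dict.mk keyboard_positions).get? (String.ofList [c])).isSome)) = true ∧
  (key_sequence.toList ≠ [] → ((PySem.Dict.mk keyboard_positions).get? " ").isSome = true)
instance (keyboard_positions : List (String × Int × Int)) (start_key : String) (key_sequence : String) : Decidable (Pre_robot_movements keyboard_positions start_key key_sequence) := by unfold Pre_robot_movements; infer_instance

def pvWitness_robot_movements : (List (String × Int × Int)) × String × String :=
  ([("A", 0, 2), (" ", 3, 0), ("0", 3, 1), ("1", 2, 0)], "A", "01A")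

def Spec_robot_movements (keyboard_positions : List (String × Int × Int)) (start_key : String) (key_sequence : String) (out : List String) : Prop := out = robot_movements_alt keyboard_positions start_key key_sequence
instance (keyboard_positions : List (String × Int × Int)) (start_key : String) (key_sequence : String) (out : List String) : Decidable (Spec_robot_movements keyboard_positions start_key key_sequence out) := by unfold Spec_robot_movements; infer_instance

-- ===== CLAIM (what is proved, stated in full; the proofs are below) =====
def Claim_equal_robot_movements : Prop := ∀ (keyboard_positions : List (String × Int × Int)) (start_key : String) (key_sequence : String), Dom_robot_movements keyboard_positions start_key key_sequence → Pre_robot_movements keyboard_positions start_key key_sequence → Spec_robot_movements keyboard_positions start_key key_sequence (robot_movements keyboard_positions start_key key_sequence)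

-- ===== LEMMAS AND PROOFS =====

-- insertBy facts specific to the replicate-block shape of A's movement list
theorem insertBy_replicate_self {α : Type} (bf : α → α → Bool) (x : α) (n : Nat)
    (h : bf x x = false) :
    PySem.List.insertBy bf x (List.replicate n x) = List.replicate (n + 1) x := by
  rw [PySem.List.insertBy_of_forall_not_before]
  · rw [← List.replicate_succ']
  · intro y hy
    rw [List.eq_of_mem_replicate hy]; exact h

theorem insertBy_skip_replicate {α : Type} (bf : α → α → Bool) (x y : α) (n : Nat) (ys : List α)
    (h : bf x y = false) :
    PySem.List.insertBy bf x (List.replicate n y ++ ys) =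
      List.replicate n y ++ PySem.List.insertBy bf x ys := by
  induction n with
  | zero => simp
  | succ n ih => simp [List.replicate_succ, PySem.List.insertBy, h, ih]

theorem insertBy_front_replicate {α : Type} (bf : α → α → Bool) (x y : α) (n : Nat)
    (h : bf y x = true) :
    PySem.List.insertBy bf y (List.replicate n x) = y :: List.replicate n x := by
  cases n with
  | zero => simp [PySem.List.insertBy]
  | succ n => simp [List.replicate_succ, PySem.List.insertBy, h]

theorem foldl_insertBy_replicate_self {α : Type} (bf : α → α → Bool) (x : α)
    (h : bf x x = false) :
    ∀ (a k : Nat), List.foldl (fun acc z => PySem.List.insertBy bf z acc)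
      (List.replicate k x) (List.replicate a x) = List.replicate (k + a) x := by
  intro a
  induction a with
  | zero => intro k; simp
  | succ a ih =>
    intro k
    rw [List.replicate_succ, List.foldl_cons, insertBy_replicate_self bf x k h, ih (k + 1)]
    have hk : k + 1 + a = k + (a + 1) := by omega
    rw [hk]

theorem foldl_insertBy_blocks {α : Type} (bf : α → α → Bool) (x y : α) (a : Nat)
    (hyy : bf y y = false) (hyx : bf y x = true) :
    ∀ (b k : Nat), List.foldl (fun acc z => PySem.List.insertBy bf z acc)
      (List.replicate k y ++ List.replicate a x) (List.replicate b y) =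
      List.replicate (k + b) y ++ List.replicate a x := by
  intro b
  induction b with
  | zero => intro k; simp
  | succ b ih =>
    intro k
    rw [List.replicate_succ, List.foldl_cons, insertBy_skip_replicate bf y y k _ hyy,
        insertBy_front_replicate bf x y a hyx]
    have : List.replicate k y ++ y :: List.replicate a x =
        List.replicate (k + 1) y ++ List.replicate a x := by
      rw [List.replicate_succ' ]
      simp
    rw [this, ih (k + 1)]
    have hk : k + 1 + b = k + (b + 1) := by omega
    rw [hk]

-- stable sort of two constant blocks with strictly decreasing keys swaps the blocks
theorem sorted_blocks_swap (a b : Nat) (x y : String) (key : String → Int)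
    (h : key y < key x) :
    PySem.List.sorted (List.replicate a x ++ List.replicate b y) key =
      List.replicate b y ++ List.replicate a x := by
  rw [PySem.List.sorted_eq_foldl_insertBy, List.foldl_append]
  have h1 : List.foldl (fun acc z => PySem.List.insertBy (fun p q => decide (key p < key q)) z acc)
      [] (List.replicate a x) = List.replicate a x := by
    have := foldl_insertBy_replicate_self (fun p q => decide (key p < key q)) x (by simp) a 0
    simpa using this
  rw [h1]
  have := foldl_insertBy_blocks (fun p q => decide (key p < key q)) x y a (by simp)
    (by simp [h]) b 0
  simpa using this

-- sorted of two constant blocks with nondecreasing keys is the list itself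
theorem sorted_blocks_keep (a b : Nat) (x y : String) (key : String → Int)
    (h : key x ≤ key y) :
    PySem.List.sorted (List.replicate a x ++ List.replicate b y) key =
      List.replicate a x ++ List.replicate b y := by
  apply PySem.List.sorted_eq_self_of_pairwise
  rw [List.pairwise_append]
  refine ⟨?_, ?_, ?_⟩
  · rw [List.pairwise_replicate]; right; exact le_refl _
  · rw [List.pairwise_replicate]; right; exact le_refl _
  · intro p hp q hq
    rw [List.eq_of_mem_replicate hp, List.eq_of_mem_replicate hq]
    exact h

-- a constant list is already sorted
theorem sorted_replicate (n : Nat) (x : String) (key : String → Int) :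
    PySem.List.sorted (List.replicate n x) key = List.replicate n x := by
  apply PySem.List.sorted_eq_self_of_pairwise
  rw [List.pairwise_replicate]; right; exact le_refl _

-- A's vertical run of direction keys is B's replicated v segment
theorem vert_run (di : Int) :
    (PySem.List.pyRange 0 |di| 1).map (fun _ => pvDirKey (PySem.Int.floordiv di |di|, 0)) =
      (if di < 0 then List.replicate (-di).toNat "^" else List.replicate di.toNat "v") := by
  rcases lt_trichotomy di 0 with hlt | heq | hgt
  · have habs : |di| = -di := abs_of_neg hlt
    have hfd : PySem.Int.floordiv di |di| = -1 := by
      rw [habs, PySem.Int.floordiv_eq_ediv_of_pos (by omega)]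
      rw [Int.ediv_neg, Int.ediv_self (by omega)]
    rw [hfd, habs, if_pos hlt]
    rw [PySem.List.pyRange_one, List.map_map]
    simp only [Function.comp_def]
    rw [List.map_const', List.length_range]
    simp only [sub_zero]
    rfl
  · simp [heq, PySem.List.pyRange]
  · have habs : |di| = di := abs_of_pos hgt
    have hfd : PySem.Int.floordiv di |di| = 1 := by
      rw [habs, PySem.Int.floordiv_eq_ediv_of_pos (by omega), Int.ediv_self (by omega)]
    rw [hfd, habs, if_neg (by omega : ¬ di < 0)]
    rw [PySem.List.pyRange_one, List.map_map]
    simp only [Function.comp_def]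
    rw [List.map_const', List.length_range]
    simp only [sub_zero]
    rfl

-- A's horizontal run of direction keys is B's replicated h segment
theorem horiz_run (dj : Int) :
    (PySem.List.pyRange 0 |dj| 1).map (fun _ => pvDirKey (0, PySem.Int.floordiv dj |dj|)) =
      (if dj < 0 then List.replicate (-dj).toNat "<" else List.replicate dj.toNat ">") := by
  rcases lt_trichotomy dj 0 with hlt | heq | hgt
  · have habs : |dj| = -dj := abs_of_neg hlt
    have hfd : PySem.Int.floordiv dj |dj| = -1 := by
      rw [habs, PySem.Int.floordiv_eq_ediv_of_pos (by omega)]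
      rw [Int.ediv_neg, Int.ediv_self (by omega)]
    rw [hfd, habs, if_pos hlt]
    rw [PySem.List.pyRange_one, List.map_map]
    simp only [Function.comp_def]
    rw [List.map_const', List.length_range]
    simp only [sub_zero]
    rfl
  · simp [heq, PySem.List.pyRange]
  · have habs : |dj| = dj := abs_of_pos hgt
    have hfd : PySem.Int.floordiv dj |dj| = 1 := by
      rw [habs, PySem.Int.floordiv_eq_ediv_of_pos (by omega), Int.ediv_self (by omega)]
    rw [hfd, habs, if_neg (by omega : ¬ dj < 0)]
    rw [PySem.List.pyRange_one, List.map_map]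
    simp only [Function.comp_def]
    rw [List.map_const', List.length_range]
    simp only [sub_zero]
    rfl

-- one transition: A's cursor calculation plus the trailing 'A' equals B's transition segment
theorem trans_eq (kp : List (String × Int × Int)) (g s f : Int × Int)
    (hg : (PySem.Dict.mk kp).get? " " = some g) :
    calculate_movement_cursors kp s f ++ ["A"] = pvTrans kp s f := by
  unfold calculate_movement_cursors pvTrans
  rw [hg]
  simp only [vert_run, horiz_run]
  set di := f.1 - s.1 with hdi
  set dj := f.2 - s.2 with hdj
  by_cases h1 : s.1 = g.1 ∧ f.2 = g.2
  · simp only [if_pos h1]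
    simp
  · simp only [if_neg h1]
    by_cases h2 : s.2 = g.2 ∧ f.1 = g.1
    · simp only [if_pos h2]
      simp
    · simp only [if_neg h2]
      congr 1
      rcases lt_trichotomy di 0 with hv | hv | hv <;>
        rcases lt_trichotomy dj 0 with hh | hh | hh
      · -- V = "^", H = "<": swap; hFirst true
        rw [if_pos hv, if_pos hh, sorted_blocks_swap _ _ _ _ _ (by decide),
            if_pos (by simp [hh])]
      · -- dj = 0: h = replicate 0 = []
        rw [if_pos hv, if_neg (by omega : ¬ dj < 0), hh]
        simp only [Int.toNat_zero, List.replicate_zero, List.append_nil]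
        rw [sorted_replicate]
        split <;> simp
      · -- V = "^", H = ">": swap; hFirst true (di<0)
        rw [if_pos hv, if_neg (by omega : ¬ dj < 0),
            sorted_blocks_swap _ _ _ _ _ (by decide), if_pos (by simp [hv])]
      · -- di = 0: v = []
        rw [if_neg (by omega : ¬ di < 0), if_pos hh, hv]
        simp only [Int.toNat_zero, List.replicate_zero, List.nil_append]
        rw [sorted_replicate]
        split <;> simp
      · -- both zero
        rw [hv, hh]
        simp [PySem.List.sorted]
      · -- di = 0, dj > 0
        rw [if_neg (by omega : ¬ di < 0), if_neg (by omega : ¬ dj < 0), hv]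
        simp only [Int.toNat_zero, List.replicate_zero, List.nil_append]
        rw [sorted_replicate]
        split <;> simp
      · -- V = "v", H = "<": swap; hFirst true (dj<0)
        rw [if_neg (by omega : ¬ di < 0), if_pos hh,
            sorted_blocks_swap _ _ _ _ _ (by decide), if_pos (by simp [hh])]
      · -- di > 0, dj = 0: h = []
        rw [if_neg (by omega : ¬ di < 0), if_neg (by omega : ¬ dj < 0), hh]
        simp only [Int.toNat_zero, List.replicate_zero, List.append_nil]
        rw [sorted_replicate]
        split <;> simp
      · -- V = "v", H = ">": keep V ++ H; hFirst false
        rw [if_neg (by omega : ¬ di < 0), if_neg (by omega : ¬ dj < 0),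
            sorted_blocks_keep _ _ _ _ _ (by decide),
            if_neg (by simp; omega)]

-- A's stateful fold over the key sequence equals B's flatMap over adjacent path pairs
theorem loop_eq (kp : List (String × Int × Int)) :
    ∀ (cs : List Char) (p : Int × Int) (acc : List String),
    (∀ c ∈ cs, (((PySem.Dict.mk kp).get? (String.ofList [c])).isSome) = true) →
    (cs ≠ [] → ((PySem.Dict.mk kp).get? " ").isSome = true) →
    (List.foldl
      (fun (st : List String × (Int × Int)) next_key =>
        match (PySem.Dict.mk kp).get? (String.ofList [next_key]) with
        | none => st
        | some next_position =>
          (st.1 ++ calculate_movement_cursors kp st.2 next_position ++ ["A"], next_position))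
      (acc, p) cs).1 =
    acc ++ (let path : List (Int × Int) :=
        p :: cs.map (fun c => (((PySem.Dict.mk kp).get? (String.ofList [c])).getD (0, 0)));
      (path.zip path.tail).flatMap (fun q => pvTrans kp q.1 q.2)) := by
  intro cs
  induction cs with
  | nil => intro p acc _ _; simp
  | cons c cs ih =>
    intro p acc hall hgap
    obtain ⟨np, hnp⟩ := Option.isSome_iff_exists.mp (hall c (List.mem_cons_self))
    obtain ⟨g, hg⟩ := Option.isSome_iff_exists.mp (hgap (by simp))
    rw [List.foldl_cons]
    simp only [hnp]
    rw [ih np (acc ++ calculate_movement_cursors kp p np ++ ["A"])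
        (fun c' hc' => hall c' (List.mem_cons_of_mem _ hc'))
        (fun _ => hgap (by simp))]
    simp only [List.map_cons, hnp, Option.getD_some, List.zip_cons_cons, List.flatMap_cons,
      List.tail_cons]
    rw [← trans_eq kp g p np hg]
    simp

-- ===== VERDICT (by name: the statement is the Claim_ definition above) =====
theorem robot_movements_spec : Claim_equal_robot_movements := by
  intro kp sk ks _ hpre
  obtain ⟨h1, h2, h3⟩ := hpre
  unfold Spec_robot_movements robot_movements robot_movements_alt
  obtain ⟨pos, hpos⟩ := Option.isSome_iff_exists.mp h1
  rw [hpos]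
  dsimp only
  rw [loop_eq kp ks.toList pos []
    (fun c hc => by
      have := List.all_eq_true.mp h2 c hc
      simpa using this)
    h3]
  simp
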